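-- pv_equiv track=rewrite | github.com/JesseSipari/HoldYerHorses | train_cards.py | get_suit_and_rank
-- ===== SOURCE A (Python) =====
-- SUITS = ['clubs', 'diamonds', 'hearts', 'spades', 'joker']
--
-- RANKS = ['two', 'three', 'four', 'five', 'six', 'seven', 'eight', 'nine', 'ten', 'jack', 'queen', 'king', 'ace', 'joker']
--
-- def get_suit_and_rank(label):
--     if 'joker' in label:
--         return 'joker', 'joker'
--     for suit in SUITS[:-1]:  # Exclude 'joker' from this loop
--         if suit in label:
--             for rank in RANKS[:-1]:  # Exclude 'joker' from this loop
--                 if rank in label: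
--                     return suit, rank
--     return None, None
-- ===== SOURCE B (Python) =====
-- SUITS = ['clubs', 'diamonds', 'hearts', 'spades', 'joker']
--
-- RANKS = ['two', 'three', 'four', 'five', 'six', 'seven', 'eight', 'nine', 'ten', 'jack', 'queen', 'king', 'ace', 'joker']
--
-- # One flat tagged word table, built once: 'J' = joker, 'S' = suit, 'R' = rank.
-- _TABLE = [('joker', 'J')] + [(s, 'S') for s in SUITS[:-1]] + [(r, 'R') for r in RANKS[:-1]]
--
-- def get_suit_and_rank(label):
--     # Single pass over the tagged table with a (suit, rank) accumulator;
--     # each kind keeps its first match, joker returns immediately.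
--     suit = rank = None
--     for word, kind in _TABLE:
--         if ((kind == 'S' and suit is None) or (kind == 'R' and rank is None) or kind == 'J') and word in label:
--             if kind == 'J':
--                 return 'joker', 'joker'
--             if kind == 'S':
--                 suit = word
--             else:
--                 rank = word
--     if suit is not None and rank is not None:
--         return suit, rank
--     return None, None
-- ===== Notes on version B (the rewrite author's own statement) =====
-- stated objective: alternative
-- what changed: Replaced A's nested suit-then-rank loops with a single pass over one flat tagged word table (joker/suit/rank entries), maintaining a (suit, rank) accumulator that keeps the first match of each kind and combining at the end only if both were found.
import Mathlib
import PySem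

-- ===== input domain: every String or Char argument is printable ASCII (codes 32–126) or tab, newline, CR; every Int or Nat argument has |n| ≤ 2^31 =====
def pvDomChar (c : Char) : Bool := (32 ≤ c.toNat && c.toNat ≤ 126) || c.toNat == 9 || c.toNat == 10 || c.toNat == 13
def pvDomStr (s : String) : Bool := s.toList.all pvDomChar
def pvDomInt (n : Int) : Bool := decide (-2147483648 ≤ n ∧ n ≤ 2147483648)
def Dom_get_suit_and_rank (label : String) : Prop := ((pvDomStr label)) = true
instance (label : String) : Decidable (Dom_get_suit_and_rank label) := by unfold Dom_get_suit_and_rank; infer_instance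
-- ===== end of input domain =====

-- B replaces A's nested suit→rank loops with a single pass over one flat tagged word table
-- keeping a (suit, rank) accumulator; same result, different decomposition (objective: alternative).

-- ===== PORT A =====
def pvSUITS : List String := ["clubs", "diamonds", "hearts", "spades", "joker"]

def pvRANKS : List String :=
  ["two", "three", "four", "five", "six", "seven", "eight", "nine", "ten",
   "jack", "queen", "king", "ace", "joker"]

-- A's inner 'for rank in RANKS[:-1]' loop: first rank found in label, none if the loop falls through
def pvRankLoop (label : String) : List String → Option String
  | [] => none
  | r :: rs => if PySem.Str.isIn r label then some r else pvRankLoop label rs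

-- A's outer 'for suit in SUITS[:-1]' loop; a fallen-through inner loop continues the outer loop
def pvSuitLoop (label : String) : List String → Option String × Option String
  | [] => (none, none)
  | s :: ss =>
    if PySem.Str.isIn s label then
      match pvRankLoop label (PySem.List.slice pvRANKS none (some (-1))) with
      | some r => (some s, some r)
      | none => pvSuitLoop label ss
    else pvSuitLoop label ss

def get_suit_and_rank (label : String) : Option String × Option String :=
  if PySem.Str.isIn "joker" label then (some "joker", some "joker")
  else pvSuitLoop label (PySem.List.slice pvSUITS none (some (-1)))

-- ===== PORT B =====
-- the flat tagged table _TABLE of Source B, built once from the same constants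
def pvTABLE : List (String × String) :=
  ("joker", "J") ::
    ((PySem.List.slice pvSUITS none (some (-1))).map (fun s => (s, "S")) ++
     (PySem.List.slice pvRANKS none (some (-1))).map (fun r => (r, "R")))

-- the final 'if suit is not None and rank is not None' combine of Source B
def pvFinish (su ra : Option String) : Option String × Option String :=
  match su, ra with
  | some s, some r => (some s, some r)
  | _, _ => (none, none)

-- Source B's single for-loop over _TABLE with the (suit, rank) accumulator
def pvScan (label : String) : List (String × String) → Option String → Option String → Option String × Option String
  | [], su, ra => pvFinish su ra
  | (w, k) :: rest, su, ra =>
    if ((k == "S" && su.isNone) || (k == "R" && ra.isNone) || k == "J") && PySem.Str.isIn w label then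
      if k == "J" then (some "joker", some "joker")
      else if k == "S" then pvScan label rest (some w) ra
      else pvScan label rest su (some w)
    else pvScan label rest su ra

def get_suit_and_rank_alt (label : String) : Option String × Option String :=
  pvScan label pvTABLE none none

-- ===== PRECONDITION & SPEC =====
def Spec_get_suit_and_rank (label : String) (out : Option String × Option String) : Prop := out = get_suit_and_rank_alt label
instance (label : String) (out : Option String × Option String) : Decidable (Spec_get_suit_and_rank label out) := by unfold Spec_get_suit_and_rank; infer_instance

-- ===== CLAIM (what is proved, stated in full; the proofs are below) =====
def Claim_equal_get_suit_and_rank : Prop := ∀ (label : String), Dom_get_suit_and_rank label → Spec_get_suit_and_rank label (get_suit_and_rank label)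

-- ===== LEMMAS AND PROOFS =====

-- A's inner loop is a first-match scan
theorem pvRankLoop_eq_find? (label : String) (rs : List String) :
    pvRankLoop label rs = rs.find? (fun r => PySem.Str.isIn r label) := by
  induction rs with
  | nil => rfl
  | cons r rs ih =>
    simp only [pvRankLoop, List.find?, ih]
    cases PySem.Str.isIn r label <;> rfl

-- A's outer loop equals the combine of two independent first-match scans
theorem pvSuitLoop_eq (label : String) (ss : List String) :
    pvSuitLoop label ss =
      pvFinish (ss.find? (fun s => PySem.Str.isIn s label))
        (pvRankLoop label (PySem.List.slice pvRANKS none (some (-1)))) := by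
  induction ss with
  | nil =>
    cases h : pvRankLoop label (PySem.List.slice pvRANKS none (some (-1))) <;> rfl
  | cons s ss ih =>
    simp only [pvSuitLoop, List.find?, ih]
    cases PySem.Str.isIn s label <;>
      cases pvRankLoop label (PySem.List.slice pvRANKS none (some (-1))) <;> simp [pvFinish]

-- B's scan over an R-tagged tail with rank already set skips every entry
theorem pvScan_R_done (label : String) (rs : List String) (su : Option String) (r : String) :
    pvScan label (rs.map (fun r => (r, "R"))) su (some r) = pvFinish su (some r) := by
  induction rs with
  | nil => rfl
  | cons x xs ih => simp [pvScan, ih]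

-- B's scan over an R-tagged tail with rank unset is a first-match scan
theorem pvScan_R (label : String) (rs : List String) (su : Option String) :
    pvScan label (rs.map (fun r => (r, "R"))) su none =
      pvFinish su (rs.find? (fun r => PySem.Str.isIn r label)) := by
  induction rs with
  | nil => rfl
  | cons x xs ih =>
    simp only [List.map, pvScan, List.find?]
    cases h : PySem.Str.isIn x label <;> simp [ih, pvScan_R_done]

-- B's scan over the S-tagged part then the R-tagged part splits into two first-match scans
theorem pvScan_S (label : String) (ss rs : List String) (su : Option String) :
    pvScan label (ss.map (fun s => (s, "S")) ++ rs.map (fun r => (r, "R"))) su none =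
      pvFinish (su.or (ss.find? (fun s => PySem.Str.isIn s label)))
        (rs.find? (fun r => PySem.Str.isIn r label)) := by
  induction ss generalizing su with
  | nil => cases su <;> simp [pvScan_R, Option.or]
  | cons x xs ih =>
    simp only [List.map, List.cons_append, pvScan, List.find?]
    cases su with
    | some s => simp [ih, Option.or]
    | none =>
      cases h : PySem.Str.isIn x label <;> simp [ih, Option.or]

-- skipping the joker table entry when 'joker' is not in the label
theorem pvScan_joker_skip (label : String) (L : List (String × String))
    (h : PySem.Str.isIn "joker" label = false) :
    pvScan label (("joker", "J") :: L) none none = pvScan label L none none := by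
  simp at h
  simp [pvScan, h]

-- ===== VERDICT (by name: the statement is the Claim_ definition above) =====
theorem get_suit_and_rank_spec : Claim_equal_get_suit_and_rank := by
  intro label _
  unfold Spec_get_suit_and_rank get_suit_and_rank get_suit_and_rank_alt pvTABLE
  have hS : PySem.List.slice pvSUITS none (some (-1)) = ["clubs", "diamonds", "hearts", "spades"] := by decide
  have hR : PySem.List.slice pvRANKS none (some (-1)) =
      ["two", "three", "four", "five", "six", "seven", "eight", "nine", "ten",
       "jack", "queen", "king", "ace"] := by decide
  rw [hS, hR]
  cases h : PySem.Str.isIn "joker" label with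
  | true =>
    have h' := h; simp at h'
    simp [pvScan, h, h']
  | false =>
    simp only [h, Bool.false_eq_true, if_false]
    rw [pvScan_joker_skip _ _ h, pvScan_S, pvSuitLoop_eq, hR, pvRankLoop_eq_find?]
    simp [Option.or]
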